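-- pv_equiv track=rewrite | github.com/trigger-segfault/catsystem-py | src/catsys/imgs/python_hgxencode.py | inv_process_delta
-- ===== SOURCE A (Python) =====
-- def inv_delta_val(buf, a, b):
--     buf[a] = (buf[a] + buf[b]) & 0xff
--
-- def inv_process_delta(deltabuf, width, height, bitdepth):
--     bytedepth = (bitdepth + 7) >> 3  # // 8
--     stride = (width * bytedepth + 3) & ~0x3
--     #stride = (((width * bitdepth + 7) >> 8) + 3) & ~3  # // 8) // 4 * 4
--     #
--     rgbabuf = deltabuf
--     #
--     for x0 in range(bytedepth, stride):
--         inv_delta_val(rgbabuf, x0, x0 - bytedepth)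
--     #
--     for xy in range(stride, stride * height):
--         inv_delta_val(rgbabuf, xy, xy - stride)
--     #
--     return rgbabuf
-- ===== SOURCE B (Python) =====
-- def inv_process_delta(deltabuf, width, height, bitdepth):
--     bytedepth = (bitdepth + 7) >> 3  # // 8
--     stride = (width * bytedepth + 3) & ~0x3
--     # horizontal pass: per channel offset, running mod-256 prefix sum along the first row
--     for off in range(min(bytedepth, stride)):
--         acc = deltabuf[off]
--         for i in range(off + bytedepth, stride, bytedepth):
--             acc = (acc + deltabuf[i]) & 0xff
--             deltabuf[i] = acc
--     # vertical pass: per column, running mod-256 prefix sum down the rows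
--     for c in range(stride):
--         acc = deltabuf[c]
--         for r in range(1, height):
--             j = r * stride + c
--             acc = (acc + deltabuf[j]) & 0xff
--             deltabuf[j] = acc
--     return deltabuf
-- ===== Notes on version B (the rewrite author's own statement) =====
-- stated objective: alternative
-- what changed: Replaces A's two flat index sweeps (each cell updated from an already-updated neighbour) by per-channel and per-column running mod-256 prefix sums carried in an accumulator, traversing the buffer in strided column-major order instead of flat row-major order.
-- outside the precondition, e.g. on inv_process_delta([121], 1, 2, -15): A returns [242], B returns [121]; on inv_process_delta([87, 49], 1, -3, -17): A returns [174, 98], B returns [87, 49]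
import Mathlib
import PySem

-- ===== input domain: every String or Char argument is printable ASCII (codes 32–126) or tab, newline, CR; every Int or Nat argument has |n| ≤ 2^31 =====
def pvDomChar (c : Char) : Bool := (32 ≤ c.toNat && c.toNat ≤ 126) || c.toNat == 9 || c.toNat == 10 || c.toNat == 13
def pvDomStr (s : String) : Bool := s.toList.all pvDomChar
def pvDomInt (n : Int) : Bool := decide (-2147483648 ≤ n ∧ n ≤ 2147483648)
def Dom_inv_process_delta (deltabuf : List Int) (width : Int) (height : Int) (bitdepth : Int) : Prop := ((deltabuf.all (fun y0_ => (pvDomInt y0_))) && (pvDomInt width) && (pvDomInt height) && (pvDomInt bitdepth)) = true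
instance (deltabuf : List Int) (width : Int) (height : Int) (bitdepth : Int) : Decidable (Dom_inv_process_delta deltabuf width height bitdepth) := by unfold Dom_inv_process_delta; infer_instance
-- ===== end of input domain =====

-- B replaces A's two flat index sweeps by per-channel / per-column running mod-256 prefix
-- sums carried in an accumulator (strided, column-major traversal); same asymptotic cost
-- ("alternative"). Both programs mutate the buffer in place in Python; the equivalence
-- proved here is about the returned value (both return the same mutated list).

-- ===== PORT A =====
def pvInvDeltaVal (buf : List Int) (a : Int) (b : Int) : List Int :=
  PySem.List.pySetD buf a
    (PySem.Int.band (PySem.List.pyGetD buf a 0 + PySem.List.pyGetD buf b 0) 255)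

def inv_process_delta (deltabuf : List Int) (width : Int) (height : Int) (bitdepth : Int) : List Int :=
  let bytedepth : Int := (bitdepth + 7) >>> (3 : Nat)
  let stride : Int := PySem.Int.band (width * bytedepth + 3) (Int.not 3)
  let rgbabuf := (PySem.List.pyRange bytedepth stride 1).foldl
    (fun b x0 => pvInvDeltaVal b x0 (x0 - bytedepth)) deltabuf
  (PySem.List.pyRange stride (stride * height) 1).foldl
    (fun b xy => pvInvDeltaVal b xy (xy - stride)) rgbabuf

-- ===== PORT B =====
def inv_process_delta_alt (deltabuf : List Int) (width : Int) (height : Int) (bitdepth : Int) : List Int :=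
  let bytedepth : Int := (bitdepth + 7) >>> (3 : Nat)
  let stride : Int := PySem.Int.band (width * bytedepth + 3) (Int.not 3)
  -- horizontal pass: per channel offset, running prefix sum along the first row
  let buf1 := (PySem.List.pyRange 0 (min bytedepth stride) 1).foldl
    (fun b off =>
      ((PySem.List.pyRange (off + bytedepth) stride bytedepth).foldl
        (fun (s : Int × List Int) i =>
          let acc := PySem.Int.band (s.1 + PySem.List.pyGetD s.2 i 0) 255
          (acc, PySem.List.pySetD s.2 i acc))
        (PySem.List.pyGetD b off 0, b)).2) deltabuf
  -- vertical pass: per column, running prefix sum down the rows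
  (PySem.List.pyRange 0 stride 1).foldl
    (fun b c =>
      ((PySem.List.pyRange 1 height 1).foldl
        (fun (s : Int × List Int) r =>
          let j := r * stride + c
          let acc := PySem.Int.band (s.1 + PySem.List.pyGetD s.2 j 0) 255
          (acc, PySem.List.pySetD s.2 j acc))
        (PySem.List.pyGetD b c 0, b)).2) buf1

-- ===== PRECONDITION & SPEC =====
-- Pre_ keeps the natural domain (nonnegative width/height/bytedepth, buffer long enough
-- for both sweeps) plus the harmless case where every loop range is empty; it excludes
-- inputs on which A raises IndexError, and inputs (negative bytedepth/width/height with a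
-- small buffer) where A still returns but its value comes from Python negative-index
-- wraparound, which B does not reproduce.
def Pre_inv_process_delta (deltabuf : List Int) (width : Int) (height : Int) (bitdepth : Int) : Prop :=
  let bytedepth : Int := (bitdepth + 7) >>> (3 : Nat)
  let stride : Int := PySem.Int.band (width * bytedepth + 3) (Int.not 3)
  (0 ≤ width ∧ 0 ≤ height ∧ 0 ≤ bytedepth ∧
     stride ≤ (deltabuf.length : Int) ∧ stride * height ≤ (deltabuf.length : Int))
  ∨ (stride ≤ 0 ∧ stride ≤ bytedepth ∧ stride * height ≤ stride)

instance (deltabuf : List Int) (width : Int) (height : Int) (bitdepth : Int) : Decidable (Pre_inv_process_delta deltabuf width height bitdepth) := by unfold Pre_inv_process_delta; infer_instance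

def pvWitness_inv_process_delta : List Int × Int × Int × Int := ([1, 2, 3, 4, 5, 6, 7, 8], 1, 2, 32)

def Spec_inv_process_delta (deltabuf : List Int) (width : Int) (height : Int) (bitdepth : Int) (out : List Int) : Prop := out = inv_process_delta_alt deltabuf width height bitdepth
instance (deltabuf : List Int) (width : Int) (height : Int) (bitdepth : Int) (out : List Int) : Decidable (Spec_inv_process_delta deltabuf width height bitdepth out) := by unfold Spec_inv_process_delta; infer_instance

-- ===== CLAIM (what is proved, stated in full; the proofs are below) =====
def Claim_equal_inv_process_delta : Prop := ∀ (deltabuf : List Int) (width : Int) (height : Int) (bitdepth : Int), Dom_inv_process_delta deltabuf width height bitdepth → Pre_inv_process_delta deltabuf width height bitdepth → Spec_inv_process_delta deltabuf width height bitdepth (inv_process_delta deltabuf width height bitdepth)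

-- ===== LEMMAS AND PROOFS =====

-- final value of one delta phase: for d ≤ j < m, cell j holds the running &0xff
-- prefix sum of its chain {j, j-d, j-2d, …} over the phase's input buffer o
def pvFV (d m : Nat) (o : List Int) (j : Nat) : Int :=
  if _h : 0 < d ∧ d ≤ j ∧ j < m then
    PySem.Int.band (o.getD j 0 + pvFV d m o (j - d)) 255
  else o.getD j 0
termination_by j
decreasing_by omega

-- hybrid buffer contents after the first `ofs` chains of a phase have been rewritten
def pvHyb (d m : Nat) (o : List Int) (ofs : Nat) (j : Nat) : Int :=
  if d ≤ j ∧ j < m ∧ j % d < ofs then pvFV d m o j else o.getD j 0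

-- A's phase as a Nat-indexed fold (t cells starting at index d)
def pvAPhase (d t : Nat) (o : List Int) : List Int :=
  (List.range t).foldl
    (fun b k => b.set (d + k) (PySem.Int.band (b.getD (d + k) 0 + b.getD k 0) 255)) o

-- one accumulator step of B's chain for offset `off`, step `d`
def pvChainStep (d off : Nat) (s : Int × List Int) (t : Nat) : Int × List Int :=
  let j := off + d * (t + 1)
  let acc := PySem.Int.band (s.1 + s.2.getD j 0) 255
  (acc, s.2.set j acc)

def pvChainRun (d off T : Nat) (b : List Int) : Int × List Int :=
  (List.range (T - 1)).foldl (pvChainStep d off) (b.getD off 0, b)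

lemma pvGetD_set (b : List Int) (i j : Nat) (v : Int) :
    (b.set i v).getD j 0 = if j = i ∧ i < b.length then v else b.getD j 0 := by
  simp only [List.getD_eq_getElem?_getD, List.getElem?_set]
  split_ifs <;> simp_all

lemma pvList_eq_of_getD {a b : List Int} (hl : a.length = b.length)
    (h : ∀ j, a.getD j 0 = b.getD j 0) : a = b := by
  apply List.ext_getElem hl
  intro i h1 h2
  have hi := h i
  rwa [List.getD_eq_getElem a 0 h1, List.getD_eq_getElem b 0 h2] at hi

lemma pvA_phase (d m : Nat) (hd : 0 < d) (o : List Int) (hm : m ≤ o.length) :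
    ∀ t, t ≤ m - d →
      (pvAPhase d t o).length = o.length ∧
      ∀ j, (pvAPhase d t o).getD j 0 =
        if d ≤ j ∧ j < d + t then pvFV d m o j else o.getD j 0 := by
  intro t
  induction t with
  | zero =>
    refine fun _ => ⟨rfl, fun j => ?_⟩
    simp only [pvAPhase, List.range_zero, List.foldl_nil]
    rw [if_neg (by omega)]
  | succ t ih =>
    intro ht
    obtain ⟨ihl, ihg⟩ := ih (by omega)
    have hdm : d + t < m := by omega
    have hol : d + t < o.length := by omega
    have hstep : pvAPhase d (t + 1) o =
        (pvAPhase d t o).set (d + t)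
          (PySem.Int.band ((pvAPhase d t o).getD (d + t) 0 + (pvAPhase d t o).getD t 0) 255) := by
      simp [pvAPhase, List.range_succ]
    have hrd : (pvAPhase d t o).getD (d + t) 0 = o.getD (d + t) 0 := by
      rw [ihg (d + t), if_neg (by omega)]
    have hrs : (pvAPhase d t o).getD t 0 = pvFV d m o t := by
      by_cases h : d ≤ t
      · rw [ihg t, if_pos ⟨h, by omega⟩]
      · rw [ihg t, if_neg (by omega), pvFV, dif_neg (by omega)]
    have hv : PySem.Int.band (o.getD (d + t) 0 + pvFV d m o t) 255 = pvFV d m o (d + t) := by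
      conv_rhs => rw [pvFV]
      rw [dif_pos ⟨hd, by omega, hdm⟩]
      have hsub : d + t - d = t := by omega
      rw [hsub]
    refine ⟨by rw [hstep]; simp [ihl], fun j => ?_⟩
    rw [hstep, pvGetD_set, hrd, hrs, hv, ihl]
    by_cases hj : j = d + t
    · rw [if_pos ⟨hj, hol⟩, if_pos (by omega), hj]
    · rw [if_neg (by simp [hj]), ihg j]
      by_cases h1 : d ≤ j ∧ j < d + t
      · rw [if_pos h1, if_pos ⟨h1.1, by omega⟩]
      · rw [if_neg h1, if_neg (by omega)]

lemma pvChain (d m off T : Nat) (hd : 0 < d) (hoff : off < d) (o b : List Int)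
    (hm : m ≤ o.length) (hlen : b.length = o.length)
    (hb : ∀ j, b.getD j 0 = pvHyb d m o off j)
    (HT : ∀ t, 1 ≤ t → (off + d * t < m ↔ t < T)) :
    ((pvChainRun d off T b).2).length = o.length ∧
    ∀ j, ((pvChainRun d off T b).2).getD j 0 = pvHyb d m o (off + 1) j := by
  have hmodd : ∀ u : ℕ, (off + d * u + d) % d = off := by
    intro u
    have h1 : off + d * u + d = off + d * (u + 1) := by rw [Nat.mul_succ]; omega
    rw [h1, Nat.add_mul_mod_self_left, Nat.mod_eq_of_lt hoff]
  have hchainrep : ∀ j : ℕ, j % d = off → d ≤ j → ∃ q, 1 ≤ q ∧ j = off + d * q := by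
    intro j hmod hdj
    have hq := Nat.div_add_mod j d
    refine ⟨j / d, ?_, by omega⟩
    rcases Nat.eq_zero_or_pos (j / d) with h0 | h1
    · exfalso; rw [h0, Nat.mul_zero] at hq; omega
    · exact h1
  have key : ∀ j : ℕ, j % d = off → d ≤ j → j < m → j ≤ off + d * (T - 1) := by
    intro j hmod hdj hjm
    obtain ⟨q, hq1, hqe⟩ := hchainrep j hmod hdj
    have hlt : q < T := (HT q hq1).mp (by omega)
    have hmul : d * q ≤ d * (T - 1) := Nat.mul_le_mul_left d (by omega)
    omega
  have huniq : ∀ u j : ℕ, j % d = off → d ≤ j → off + d * u < j → j ≤ off + d * u + d →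
      j = off + d * u + d := by
    intro u j hmod hdj hlo hhi
    obtain ⟨q, _, hqe⟩ := hchainrep j hmod hdj
    have h1 : d * u < d * q := by omega
    have h2 : u < q := Nat.lt_of_mul_lt_mul_left h1
    have h3 : d * q ≤ d * (u + 1) := by rw [Nat.mul_succ]; omega
    have h4 : q ≤ u + 1 := Nat.le_of_mul_le_mul_left h3 hd
    have h5 : q = u + 1 := by omega
    rw [hqe, h5, Nat.mul_succ]; omega
  have aux : ∀ u, u ≤ T - 1 →
      (((List.range u).foldl (pvChainStep d off) (b.getD off 0, b)).1 = pvFV d m o (off + d * u)) ∧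
      (((List.range u).foldl (pvChainStep d off) (b.getD off 0, b)).2).length = o.length ∧
      ∀ j, (((List.range u).foldl (pvChainStep d off) (b.getD off 0, b)).2).getD j 0 =
        if d ≤ j ∧ j < m ∧ (j % d < off ∨ (j % d = off ∧ j ≤ off + d * u)) then pvFV d m o j
        else o.getD j 0 := by
    intro u
    induction u with
    | zero =>
      intro _
      simp only [List.range_zero, List.foldl_nil, Nat.mul_zero, Nat.add_zero]
      refine ⟨?_, hlen, ?_⟩
      · rw [hb off]
        simp only [pvHyb]
        rw [if_neg (by omega), pvFV, dif_neg (by omega)]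
      · intro j
        rw [hb j]
        simp only [pvHyb]
        split_ifs <;> first | rfl | omega
    | succ u ih =>
      intro hu
      obtain ⟨iha, ihl, ihg⟩ := ih (by omega)
      have hj0m : off + d * u + d < m := by
        have := (HT (u + 1) (by omega)).mpr (by omega)
        rw [Nat.mul_succ] at this; omega
      have hj0l : off + d * u + d < o.length := by omega
      have hstep : (List.range (u + 1)).foldl (pvChainStep d off) (b.getD off 0, b) =
          pvChainStep d off ((List.range u).foldl (pvChainStep d off) (b.getD off 0, b)) u := by
        simp [List.range_succ]
      have hidx : off + d * (u + 1) = off + d * u + d := by rw [Nat.mul_succ]; omega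
      have hread : (((List.range u).foldl (pvChainStep d off) (b.getD off 0, b)).2).getD
          (off + d * u + d) 0 = o.getD (off + d * u + d) 0 := by
        rw [ihg]
        rw [if_neg (by rw [hmodd u]; omega)]
      have hFVj0 : pvFV d m o (off + d * u + d) =
          PySem.Int.band (o.getD (off + d * u + d) 0 + pvFV d m o (off + d * u)) 255 := by
        rw [pvFV, dif_pos ⟨hd, by omega, hj0m⟩]
        have hsub : off + d * u + d - d = off + d * u := by omega
        rw [hsub]
      have hacc : PySem.Int.band
          (((List.range u).foldl (pvChainStep d off) (b.getD off 0, b)).1 +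
            (((List.range u).foldl (pvChainStep d off) (b.getD off 0, b)).2).getD
              (off + d * u + d) 0) 255 = pvFV d m o (off + d * u + d) := by
        rw [hread, iha, hFVj0, add_comm]
      rw [hstep]
      simp only [pvChainStep, hidx]
      refine ⟨hacc, ?_, ?_⟩
      · rw [List.length_set]; exact ihl
      intro j
      rw [pvGetD_set, hacc, ihl]
      by_cases hj : j = off + d * u + d
      · rw [if_pos ⟨hj, hj0l⟩, hj, if_pos ⟨by omega, hj0m, Or.inr ⟨hmodd u, by omega⟩⟩]
      · rw [if_neg (by simp [hj]), ihg j]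
        by_cases h1 : d ≤ j ∧ j < m ∧ (j % d < off ∨ (j % d = off ∧ j ≤ off + d * u))
        · have h2 : d ≤ j ∧ j < m ∧ (j % d < off ∨ (j % d = off ∧ j ≤ off + d * u + d)) := by
            omega
          rw [if_pos h1, if_pos h2]
        · have hneg : ¬ (d ≤ j ∧ j < m ∧ (j % d < off ∨ (j % d = off ∧ j ≤ off + d * u + d))) := by
            intro hcon
            apply h1
            refine ⟨hcon.1, hcon.2.1, ?_⟩
            rcases hcon.2.2 with h | h
            · exact Or.inl h
            · refine Or.inr ⟨h.1, ?_⟩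
              by_contra hgt
              exact hj (huniq u j h.1 hcon.1 (by omega) h.2)
          rw [if_neg h1, if_neg hneg]
  obtain ⟨_, hl, hg⟩ := aux (T - 1) le_rfl
  refine ⟨hl, fun j => ?_⟩
  have hrun : pvChainRun d off T b = (List.range (T - 1)).foldl (pvChainStep d off) (b.getD off 0, b) := rfl
  rw [hrun, hg j]
  simp only [pvHyb]
  by_cases hc : d ≤ j ∧ j < m
  · by_cases hcm : j % d = off
    · rw [if_pos ⟨hc.1, hc.2, Or.inr ⟨hcm, key j hcm hc.1 hc.2⟩⟩, if_pos ⟨hc.1, hc.2, by omega⟩]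
    · by_cases hlt : j % d < off
      · rw [if_pos ⟨hc.1, hc.2, Or.inl hlt⟩, if_pos ⟨hc.1, hc.2, by omega⟩]
      · rw [if_neg (by omega), if_neg (by omega)]
  · rw [if_neg (by omega), if_neg (by omega)]

lemma pvOuter (d m : Nat) (o : List Int) (f : List Int → Nat → List Int)
    (hf : ∀ ofs b, ofs < d → b.length = o.length →
      (∀ j, b.getD j 0 = pvHyb d m o ofs j) →
      (f b ofs).length = o.length ∧ ∀ j, (f b ofs).getD j 0 = pvHyb d m o (ofs + 1) j) :
    ∀ u, u ≤ d →
      ((List.range u).foldl f o).length = o.length ∧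
      ∀ j, ((List.range u).foldl f o).getD j 0 = pvHyb d m o u j := by
  intro u
  induction u with
  | zero =>
    intro _
    constructor
    · rfl
    · intro j; simp [pvHyb]
  | succ u ih =>
    intro hu
    obtain ⟨ihl, ihg⟩ := ih (by omega)
    have hstep : (List.range (u + 1)).foldl f o = f ((List.range u).foldl f o) u := by
      simp [List.range_succ]
    rw [hstep]
    exact hf u _ (by omega) ihl ihg

lemma pvPhase_eq (d m : Nat) (hd : 0 < d) (o : List Int) (hm : m ≤ o.length)
    (f : List Int → Nat → List Int)
    (hf : ∀ ofs b, ofs < d → b.length = o.length →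
      (∀ j, b.getD j 0 = pvHyb d m o ofs j) →
      (f b ofs).length = o.length ∧ ∀ j, (f b ofs).getD j 0 = pvHyb d m o (ofs + 1) j) :
    (List.range d).foldl f o = pvAPhase d (m - d) o := by
  obtain ⟨hol, hog⟩ := pvOuter d m o f hf d le_rfl
  obtain ⟨hal, hag⟩ := pvA_phase d m hd o hm (m - d) le_rfl
  apply pvList_eq_of_getD (by rw [hol, hal])
  intro j
  have hmod := Nat.mod_lt j hd
  rw [hog j, hag j]
  simp only [pvHyb]
  by_cases hc : d ≤ j ∧ j < d + (m - d)
  · rw [if_pos (show d ≤ j ∧ j < m ∧ j % d < d by omega), if_pos hc]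
  · rw [if_neg (by omega), if_neg hc]

lemma pvBandNot3 (x : Int) (hx : 0 ≤ x) :
    PySem.Int.band x (Int.not 3) = x - x % 4 := by
  have hnot : Int.not 3 = -4 := by decide
  rw [hnot]
  simp only [PySem.Int.band]
  rw [if_pos hx, if_neg (by norm_num)]
  have h3 : x.toNat &&& ((-(-4 : Int) - 1)).toNat = x.toNat % 4 := by
    norm_num
    exact Nat.and_two_pow_sub_one_eq_mod x.toNat 2
  omega

-- chain length for offset k, step D, bound S (number of processed cells + 1)
def pvT (D S k : ℕ) : ℕ := (if k + D < S then (S - k - 1) / D else 0) + 1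

lemma pvCovH (D S k : ℕ) (hD : 0 < D) :
    ∀ t, 1 ≤ t → (k + D * t < S ↔ t < pvT D S k) := by
  intro t ht
  unfold pvT
  by_cases hk : k + D < S
  · rw [if_pos hk]
    have h := Nat.le_div_iff_mul_le (x := t) (y := S - k - 1) (k := D) hD
    rw [mul_comm] at h
    omega
  · rw [if_neg hk]
    have h1 : D * 1 ≤ D * t := Nat.mul_le_mul_left D ht
    omega

lemma pvCovV (S H k : ℕ) (_hS : 0 < S) (hk : k < S) :
    ∀ t, 1 ≤ t → (k + S * t < S * H ↔ t < H) := by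
  intro t _
  constructor
  · intro h
    exact Nat.lt_of_mul_lt_mul_left (a := S) (by omega)
  · intro h
    have h1 : S * (t + 1) ≤ S * H := Nat.mul_le_mul_left S (by omega)
    have h2 : S * (t + 1) = S * t + S := by rw [Nat.mul_succ]
    omega

lemma pvConvA (D S : ℕ) (o : List Int) :
    (PySem.List.pyRange (D : Int) (S : Int) 1).foldl
      (fun b x0 => pvInvDeltaVal b x0 (x0 - (D : Int))) o = pvAPhase D (S - D) o := by
  rw [PySem.List.pyRange_one, List.foldl_map]
  unfold pvAPhase
  have hcount : ((S : Int) - (D : Int)).toNat = S - D := by omega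
  rw [hcount]
  congr 1
  funext b k
  unfold pvInvDeltaVal
  have h0 : (0 : Int) ≤ (D : Int) + (k : Int) := by positivity
  rw [PySem.List.pySetD_of_nonneg _ _ h0, PySem.List.pyGetD_of_nonneg _ _ h0]
  have h1 : ((D : Int) + (k : Int) - (D : Int)) = (k : Int) := by ring
  rw [h1, PySem.List.pyGetD_of_nonneg _ _ (Int.natCast_nonneg k)]
  have h2 : ((D : Int) + (k : Int)).toNat = D + k := by omega
  have h3 : ((k : ℕ) : Int).toNat = k := by omega
  rw [h2, h3]

lemma pvFoldl_fun_congr {α β : Type} (f g : β → α → β) (i : β) (l : List α)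
    (h : ∀ s x, f s x = g s x) : l.foldl f i = l.foldl g i := by
  induction l generalizing i with
  | nil => rfl
  | cons x xs ih => simp only [List.foldl_cons, h]; exact ih (g i x)

lemma pvConvB1 (D S : ℕ) (hD : 0 < D) (o : List Int) :
    (PySem.List.pyRange 0 (D : Int) 1).foldl
      (fun b off =>
        ((PySem.List.pyRange (off + (D : Int)) (S : Int) (D : Int)).foldl
          (fun (s : Int × List Int) i =>
            let acc := PySem.Int.band (s.1 + PySem.List.pyGetD s.2 i 0) 255
            (acc, PySem.List.pySetD s.2 i acc))
          (PySem.List.pyGetD b off 0, b)).2) o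
    = (List.range D).foldl (fun b k => (pvChainRun D k (pvT D S k) b).2) o := by
  rw [PySem.List.pyRange_one, List.foldl_map]
  rw [show ((D : Int) - 0).toNat = D by omega]
  congr 1
  funext b k
  simp only [zero_add]
  unfold pvChainRun pvT
  rw [Nat.add_sub_cancel]
  rw [PySem.List.pyRange_of_pos _ _ (by exact_mod_cast hD), List.foldl_map]
  rw [PySem.List.pyGetD_of_nonneg b 0 (Int.natCast_nonneg k), Int.toNat_natCast]
  by_cases h2 : (k : Int) + (D : Int) < (S : Int)
  · have h2' : k + D < S := by exact_mod_cast h2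
    rw [if_pos h2, if_pos h2']
    have hc : (((S : Int) - ((k : Int) + (D : Int)) + (D : Int) - 1) / (D : Int)).toNat
        = (S - k - 1) / D := by
      have hnum : ((S : Int) - ((k : Int) + (D : Int)) + (D : Int) - 1)
          = ((S - k - 1 : ℕ) : Int) := by omega
      rw [hnum]
      norm_cast
    rw [hc]
    apply congrArg Prod.snd
    apply pvFoldl_fun_congr
    intro st t
    simp only [pvChainStep]
    have hidx : ((k : Int) + (D : Int)) + (D : Int) * (t : Int)
        = ((k + D * (t + 1) : ℕ) : Int) := by push_cast; ring
    rw [hidx, PySem.List.pyGetD_of_nonneg _ _ (Int.natCast_nonneg _),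
      PySem.List.pySetD_of_nonneg _ _ (Int.natCast_nonneg _), Int.toNat_natCast]
  · have h2' : ¬ k + D < S := by exact_mod_cast h2
    rw [if_neg h2, if_neg h2']
    simp

lemma pvConvB2 (S H : ℕ) (o : List Int) :
    (PySem.List.pyRange 0 (S : Int) 1).foldl
      (fun b c =>
        ((PySem.List.pyRange 1 (H : Int) 1).foldl
          (fun (s : Int × List Int) r =>
            let j := r * (S : Int) + c
            let acc := PySem.Int.band (s.1 + PySem.List.pyGetD s.2 j 0) 255
            (acc, PySem.List.pySetD s.2 j acc))
          (PySem.List.pyGetD b c 0, b)).2) o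
    = (List.range S).foldl (fun b k => (pvChainRun S k H b).2) o := by
  rw [PySem.List.pyRange_one 0, List.foldl_map]
  rw [show ((S : Int) - 0).toNat = S by omega]
  congr 1
  funext b k
  simp only [zero_add]
  rw [PySem.List.pyRange_one 1, List.foldl_map]
  unfold pvChainRun
  rw [PySem.List.pyGetD_of_nonneg b 0 (Int.natCast_nonneg k), Int.toNat_natCast]
  rw [show ((H : Int) - 1).toNat = H - 1 by omega]
  apply congrArg Prod.snd
  apply pvFoldl_fun_congr
  intro st t
  simp only [pvChainStep]
  have hidx : ((1 : Int) + (t : Int)) * (S : Int) + (k : Int)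
      = ((k + S * (t + 1) : ℕ) : Int) := by push_cast; ring
  rw [hidx, PySem.List.pyGetD_of_nonneg _ _ (Int.natCast_nonneg _),
    PySem.List.pySetD_of_nonneg _ _ (Int.natCast_nonneg _), Int.toNat_natCast]

-- ===== VERDICT (by name: the statement is the Claim_ definition above) =====
theorem inv_process_delta_spec : Claim_equal_inv_process_delta := by
  intro deltabuf width height bitdepth _ hpre
  simp only [Spec_inv_process_delta, inv_process_delta, inv_process_delta_alt]
  simp only [Pre_inv_process_delta] at hpre
  set bd : Int := (bitdepth + 7) >>> (3 : Nat) with hbddef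
  set st : Int := PySem.Int.band (width * bd + 3) (Int.not 3) with hstdef
  by_cases hpos : 0 < st
  · -- main case: both phases run; reduce both sides to pvAPhase
    rcases hpre with ⟨hw, hh, hb0, hlen1, hlen2⟩ | ⟨h1, _, _⟩
    swap
    · omega
    have hx0 : (0 : Int) ≤ width * bd := mul_nonneg hw hb0
    have hband := pvBandNot3 (width * bd + 3) (by omega)
    rw [← hstdef] at hband
    have hm2 : (width * bd + 3) % 4 < 4 := Int.emod_lt_of_pos _ (by norm_num)
    have hm1 : (0 : Int) ≤ (width * bd + 3) % 4 := Int.emod_nonneg _ (by norm_num)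
    have hxpos : (0 : Int) < width * bd := by
      by_contra h
      push Not at h
      have hz : width * bd = 0 := le_antisymm h hx0
      rw [hz] at hband
      omega
    have hbd1 : (1 : Int) ≤ bd := by
      by_contra h
      push Not at h
      have hz : bd = 0 := by omega
      rw [hz, mul_zero] at hxpos
      exact lt_irrefl _ hxpos
    have hw1 : (1 : Int) ≤ width := by
      by_contra h
      push Not at h
      have hz : width = 0 := by omega
      rw [hz, zero_mul] at hxpos
      exact lt_irrefl _ hxpos
    have hbdst : bd ≤ st := by
      have h := le_mul_of_one_le_left hb0 hw1
      omega
    obtain ⟨D, hD⟩ : ∃ D : ℕ, bd = (D : Int) := ⟨bd.toNat, (Int.toNat_of_nonneg hb0).symm⟩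
    obtain ⟨S, hS⟩ : ∃ S : ℕ, st = (S : Int) := ⟨st.toNat, (Int.toNat_of_nonneg (by omega)).symm⟩
    obtain ⟨H, hH⟩ : ∃ H : ℕ, height = (H : Int) := ⟨height.toNat, (Int.toNat_of_nonneg hh).symm⟩
    have hD1 : 0 < D := by omega
    have hS1 : 0 < S := by omega
    have hSn : S ≤ deltabuf.length := by omega
    have hSH : S * H ≤ deltabuf.length := by
      have hc : st * height = ((S * H : ℕ) : Int) := by rw [hS, hH]; push_cast; ring
      omega
    rw [hD, hS, hH]
    rw [show ((S : Int) * (H : Int)) = ((S * H : ℕ) : Int) by push_cast; ring]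
    rw [show min ((D : ℕ) : Int) ((S : ℕ) : Int) = ((D : ℕ) : Int) by omega]
    rw [pvConvA D S deltabuf, pvConvA S (S * H) _, pvConvB1 D S hD1 deltabuf, pvConvB2 S H _]
    have hphase1 : (List.range D).foldl (fun b k => (pvChainRun D k (pvT D S k) b).2) deltabuf
        = pvAPhase D (S - D) deltabuf :=
      pvPhase_eq D S hD1 deltabuf hSn _
        (fun ofs b hofs hblen hbh =>
          pvChain D S ofs (pvT D S ofs) hD1 hofs deltabuf b hSn hblen hbh (pvCovH D S ofs hD1))
    rw [hphase1]
    have hlen1' : (pvAPhase D (S - D) deltabuf).length = deltabuf.length :=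
      (pvA_phase D S hD1 deltabuf hSn (S - D) le_rfl).1
    have hphase2 : (List.range S).foldl (fun b k => (pvChainRun S k H b).2)
          (pvAPhase D (S - D) deltabuf)
        = pvAPhase S (S * H - S) (pvAPhase D (S - D) deltabuf) :=
      pvPhase_eq S (S * H) hS1 _ (by rw [hlen1']; exact hSH) _
        (fun ofs b hofs hblen hbh =>
          pvChain S (S * H) ofs H hS1 hofs _ b (by rw [hlen1']; exact hSH) hblen hbh
            (pvCovV S H ofs hS1 hofs))
    rw [hphase2]
  · -- degenerate case: stride ≤ 0, every loop range is empty on both sides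
    push Not at hpos
    have hkey : st ≤ bd ∧ st * height ≤ st := by
      rcases hpre with ⟨hw, hh, hb0, hlen1, hlen2⟩ | ⟨h1, h2, h3⟩
      · have hx0 : (0 : Int) ≤ width * bd := mul_nonneg hw hb0
        have hband := pvBandNot3 (width * bd + 3) (by omega)
        rw [← hstdef] at hband
        have hm2 : (width * bd + 3) % 4 < 4 := Int.emod_lt_of_pos _ (by norm_num)
        have hst0 : st = 0 := by omega
        refine ⟨by omega, ?_⟩
        rw [hst0, zero_mul]
      · exact ⟨h2, h3⟩
    rw [PySem.List.pyRange_one_eq_nil hkey.1, PySem.List.pyRange_one_eq_nil hkey.2,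
      PySem.List.pyRange_one_eq_nil (show st ≤ 0 from hpos),
      PySem.List.pyRange_one_eq_nil (show min bd st ≤ 0 by omega)]
    simp only [List.foldl_nil]
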